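-- pv_equiv track=rewrite | github.com/chinese-liliths-throne/GirlLifeLocalization | src/paratranz_precheck.py | _code_structure_signature
-- ===== SOURCE A (Python) =====
-- def _code_structure_signature(text: str) -> tuple[int, int, int, int, int]:
--     single_quotes = 0
--     left_paren = 0
--     right_paren = 0
--     left_bracket = 0
--     right_bracket = 0
--     quote: str | None = None
--     index = 0
--
--     while index < len(text):
--         char = text[index]
--         if quote:
--             if char == quote:
--                 if index + 1 < len(text) and text[index + 1] == quote:
--                     index += 2
--                     continue
--                 quote = None
--             index += 1
--             continue
--
--         if char not in ("'", '"'):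
--             if char == "(":
--                 left_paren += 1
--             elif char == ")":
--                 right_paren += 1
--             elif char == "[":
--                 left_bracket += 1
--             elif char == "]":
--                 right_bracket += 1
--             index += 1
--             continue
--
--         quote = char
--         if char == "'":
--             single_quotes += 1
--         index += 1
--     return (single_quotes, left_paren, right_paren, left_bracket, right_bracket)
-- ===== SOURCE B (Python) =====
-- def _code_structure_signature(text: str) -> tuple[int, int, int, int, int]:
--     # Consume the text as an explicit stack of characters; collect every
--     # unquoted character into a buffer and count brackets afterwards with
--     # library calls, instead of maintaining index arithmetic and four
--     # live counters.
--     stack = list(reversed(text))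
--     buf = []
--     single_quotes = 0
--     quote = None
--     while stack:
--         char = stack.pop()
--         if quote is None:
--             if char == "'":
--                 quote = char
--                 single_quotes += 1
--             elif char == '"':
--                 quote = char
--             else:
--                 buf.append(char)
--         elif char == quote:
--             if stack and stack[-1] == quote:
--                 stack.pop()  # doubled quote: stay inside the string
--             else:
--                 quote = None
--     joined = ''.join(buf)
--     return (single_quotes, joined.count('('), joined.count(')'),
--             joined.count('['), joined.count(']'))
-- ===== Notes on version B (the rewrite author's own statement) =====
-- stated objective: alternative
-- what changed: Replaces the index-arithmetic state machine with four live bracket counters by a loop that pops characters off an explicit stack, collects every unquoted character into a buffer, and obtains the four bracket counts afterwards with str.count over the joined buffer.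
import Mathlib
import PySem

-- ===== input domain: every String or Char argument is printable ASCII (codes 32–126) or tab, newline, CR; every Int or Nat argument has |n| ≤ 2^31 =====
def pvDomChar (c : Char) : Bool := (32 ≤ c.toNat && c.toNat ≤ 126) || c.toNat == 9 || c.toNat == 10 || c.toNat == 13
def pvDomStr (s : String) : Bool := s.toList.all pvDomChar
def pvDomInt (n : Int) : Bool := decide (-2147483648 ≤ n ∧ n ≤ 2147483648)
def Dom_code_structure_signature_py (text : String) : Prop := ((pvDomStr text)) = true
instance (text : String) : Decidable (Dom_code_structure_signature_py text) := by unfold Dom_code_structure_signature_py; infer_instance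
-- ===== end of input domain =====

-- B replaces A's index-based state machine with a stack of characters and a
-- buffer of unquoted characters counted afterwards; objective: alternative decomposition.

-- ===== PORT A =====
-- A's while loop over an index, with the four live counters and the doubled-quote lookahead.
def goA (cs : List Char) (i : Nat) (sq lp rp lb rb : Int) (quote : Option Char) :
    Int × Int × Int × Int × Int :=
  if h : i < cs.length then
    let c := cs[i]
    match quote with
    | some q =>
      if c = q then
        if h2 : i + 1 < cs.length then
          if cs[i+1] = q then goA cs (i+2) sq lp rp lb rb (some q)
          else goA cs (i+1) sq lp rp lb rb none
        else goA cs (i+1) sq lp rp lb rb none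
      else goA cs (i+1) sq lp rp lb rb (some q)
    | none =>
      if c = '\'' then goA cs (i+1) (sq+1) lp rp lb rb (some c)
      else if c = '"' then goA cs (i+1) sq lp rp lb rb (some c)
      else if c = '(' then goA cs (i+1) sq (lp+1) rp lb rb none
      else if c = ')' then goA cs (i+1) sq lp (rp+1) lb rb none
      else if c = '[' then goA cs (i+1) sq lp rp (lb+1) rb none
      else if c = ']' then goA cs (i+1) sq lp rp lb (rb+1) none
      else goA cs (i+1) sq lp rp lb rb none
  else (sq, lp, rp, lb, rb)
termination_by cs.length - i

def code_structure_signature_py (text : String) : Int × Int × Int × Int × Int :=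
  goA text.toList 0 0 0 0 0 0 none

-- ===== PORT B =====
-- B's while loop: pop characters off a stack, buffer unquoted ones, count at the end.
def goB (stack : List Char) (quote : Option Char) (buf : List Char) (sq : Int) :
    Int × List Char :=
  match stack, quote with
  | [], _ => (sq, buf)
  | c :: rest, none =>
    if c = '\'' then goB rest (some c) buf (sq + 1)
    else if c = '"' then goB rest (some c) buf sq
    else goB rest none (buf ++ [c]) sq
  | c :: rest, some q =>
    if c = q then
      match rest with
      | c2 :: rest2 => if c2 = q then goB rest2 (some q) buf sq else goB (c2 :: rest2) none buf sq
      | [] => (sq, buf)   -- stack exhausted right after closing the quote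
    else goB rest (some q) buf sq
termination_by stack.length

def code_structure_signature_py_alt (text : String) : Int × Int × Int × Int × Int :=
  let r := goB text.toList none [] 0
  -- ''.join(buf).count(c) for a single character c is exactly the list count
  (r.1, (r.2.count '(' : Int), (r.2.count ')' : Int),
        (r.2.count '[' : Int), (r.2.count ']' : Int))

-- ===== PRECONDITION & SPEC =====
def Spec_code_structure_signature_py (text : String) (out : Int × Int × Int × Int × Int) : Prop := out = code_structure_signature_py_alt text
instance (text : String) (out : Int × Int × Int × Int × Int) : Decidable (Spec_code_structure_signature_py text out) := by unfold Spec_code_structure_signature_py; infer_instance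

-- ===== CLAIM (what is proved, stated in full; the proofs are below) =====
def Claim_equal_code_structure_signature_py : Prop := ∀ (text : String), Dom_code_structure_signature_py text → Spec_code_structure_signature_py text (code_structure_signature_py text)

-- ===== LEMMAS AND PROOFS =====

-- goB's accumulators split off: the count is added to, the buffer appended to.
lemma goB_acc : ∀ (n : Nat) (l : List Char), l.length ≤ n → ∀ (q : Option Char) (buf : List Char) (sq : Int),
    goB l q buf sq = (sq + (goB l q [] 0).1, buf ++ (goB l q [] 0).2) := by
  intro n
  induction n with
  | zero =>
    intro l hl q buf sq
    have hnil : l = [] := by cases l <;> simp_all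
    subst hnil; simp [goB]
  | succ n ih =>
    intro l hl q buf sq
    match l, q with
    | [], _ => simp [goB]
    | c :: rest, none =>
      have hr : rest.length ≤ n := by simp at hl; omega
      rw [goB, goB]
      by_cases h1 : c = '\''
      · simp only [if_pos h1]
        rw [ih rest hr]; simp only [zero_add]
        rw [ih rest hr (some c) [] 1]
        simp [Prod.ext_iff]; ring
      · by_cases h2 : c = '"'
        · simp only [if_neg h1, if_pos h2]
          rw [ih rest hr]
        · simp only [if_neg h1, if_neg h2]
          rw [ih rest hr]; simp only [List.nil_append]
          rw [ih rest hr none [c] 0]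
          simp
    | c :: rest, some q' =>
      match rest with
      | [] => by_cases h1 : c = q' <;> simp [goB, h1]
      | c2 :: rest2 =>
        have hr : (c2 :: rest2).length ≤ n := by simp at hl ⊢; omega
        have hr2 : rest2.length ≤ n := by simp at hl; omega
        by_cases h1 : c = q'
        · by_cases h2 : c2 = q'
          · have hL : goB (c :: c2 :: rest2) (some q') buf sq = goB rest2 (some q') buf sq := by
              conv_lhs => rw [goB]
              simp [h1, h2]
            have hR : goB (c :: c2 :: rest2) (some q') [] 0 = goB rest2 (some q') [] 0 := by
              conv_lhs => rw [goB]
              simp [h1, h2]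
            rw [hL, hR, ih rest2 hr2]
          · have hL : goB (c :: c2 :: rest2) (some q') buf sq = goB (c2 :: rest2) none buf sq := by
              conv_lhs => rw [goB]
              simp [h1, h2]
            have hR : goB (c :: c2 :: rest2) (some q') [] 0 = goB (c2 :: rest2) none [] 0 := by
              conv_lhs => rw [goB]
              simp [h1, h2]
            rw [hL, hR, ih (c2 :: rest2) hr]
        · have hL : goB (c :: c2 :: rest2) (some q') buf sq = goB (c2 :: rest2) (some q') buf sq := by
            conv_lhs => rw [goB]
            simp [h1]
          have hR : goB (c :: c2 :: rest2) (some q') [] 0 = goB (c2 :: rest2) (some q') [] 0 := by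
            conv_lhs => rw [goB]
            simp [h1]
          rw [hL, hR, ih (c2 :: rest2) hr]

-- A's indexed scan equals B's stack scan on the remaining suffix, with the
-- four bracket counters realised as counts over B's buffer.
lemma key_aux : ∀ (n : Nat) (cs : List Char) (i : Nat), cs.length - i ≤ n →
    ∀ (sq lp rp lb rb : Int) (q : Option Char),
    goA cs i sq lp rp lb rb q =
      (sq + (goB (cs.drop i) q [] 0).1,
       lp + ((goB (cs.drop i) q [] 0).2.count '(' : Int),
       rp + ((goB (cs.drop i) q [] 0).2.count ')' : Int),
       lb + ((goB (cs.drop i) q [] 0).2.count '[' : Int),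
       rb + ((goB (cs.drop i) q [] 0).2.count ']' : Int)) := by
  intro n
  induction n with
  | zero =>
    intro cs i hn sq lp rp lb rb q
    have hge : ¬ i < cs.length := by omega
    have hdrop : cs.drop i = [] := List.drop_eq_nil_of_le (by omega)
    rw [goA]; simp [hge, hdrop, goB]
  | succ n ih =>
    intro cs i hn sq lp rp lb rb q
    by_cases h : i < cs.length
    case neg =>
      have hdrop : cs.drop i = [] := List.drop_eq_nil_of_le (by omega)
      rw [goA]; simp [h, hdrop, goB]
    case pos =>
    have hn1 : cs.length - (i+1) ≤ n := by omega
    have hdrop : cs.drop i = cs[i] :: cs.drop (i+1) := ((List.getElem_cons_drop (as := cs) h)).symm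
    rw [hdrop]
    match q with
    | none =>
      by_cases h1 : cs[i] = '\''
      · have hA : goA cs i sq lp rp lb rb none = goA cs (i+1) (sq+1) lp rp lb rb (some cs[i]) := by
          conv_lhs => rw [goA]
          simp [h, h1]
        have hB : goB (cs[i] :: cs.drop (i+1)) none [] 0 = goB (cs.drop (i+1)) (some cs[i]) [] 1 := by
          conv_lhs => rw [goB]
          simp [h1]
        rw [hA, hB, ih cs (i+1) hn1, goB_acc (cs.drop (i+1)).length _ le_rfl (some cs[i]) [] 1]
        simp [Prod.ext_iff]; ring
      · by_cases h2 : cs[i] = '"'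
        · have hA : goA cs i sq lp rp lb rb none = goA cs (i+1) sq lp rp lb rb (some cs[i]) := by
            conv_lhs => rw [goA]
            simp [h, h2]
          have hB : goB (cs[i] :: cs.drop (i+1)) none [] 0 = goB (cs.drop (i+1)) (some cs[i]) [] 0 := by
            conv_lhs => rw [goB]
            simp [h2]
          rw [hA, hB, ih cs (i+1) hn1]
        · -- unquoted non-quote character: A bumps at most one counter, B buffers it
          have hB : goB (cs[i] :: cs.drop (i+1)) none [] 0
              = (((goB (cs.drop (i+1)) none [] 0).1 : Int), cs[i] :: (goB (cs.drop (i+1)) none [] 0).2) := by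
            conv_lhs => rw [goB]
            simp [h1, h2]
            rw [goB_acc (cs.drop (i+1)).length _ le_rfl none [cs[i]] 0]
            simp
          have hA : goA cs i sq lp rp lb rb none =
              (if cs[i] = '(' then goA cs (i+1) sq (lp+1) rp lb rb none
               else if cs[i] = ')' then goA cs (i+1) sq lp (rp+1) lb rb none
               else if cs[i] = '[' then goA cs (i+1) sq lp rp (lb+1) rb none
               else if cs[i] = ']' then goA cs (i+1) sq lp rp lb (rb+1) none
               else goA cs (i+1) sq lp rp lb rb none) := by
            conv_lhs => rw [goA]
            simp [h, h1, h2]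
          rw [hA, hB]
          split_ifs with h3 h4 h5 h6 <;>
            rw [ih cs (i+1) hn1] <;>
            simp_all [Prod.ext_iff] <;> omega
    | some q' =>
      by_cases h1 : cs[i] = q'
      · by_cases h2 : i + 1 < cs.length
        · have hdrop2 : cs.drop (i+1) = cs[i+1] :: cs.drop (i+2) := ((List.getElem_cons_drop (as := cs) h2)).symm
          have hn2 : cs.length - (i+2) ≤ n := by omega
          by_cases h3 : cs[i+1] = q'
          · have hA : goA cs i sq lp rp lb rb (some q') = goA cs (i+2) sq lp rp lb rb (some q') := by
              conv_lhs => rw [goA]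
              simp [h, h1, h2, h3]
            have hB : goB (cs[i] :: cs.drop (i+1)) (some q') [] 0 = goB (cs.drop (i+2)) (some q') [] 0 := by
              conv_lhs => rw [hdrop2]; rw [goB]
              simp [h1, h3]
            rw [hA, hB, ih cs (i+2) hn2]
          · have hA : goA cs i sq lp rp lb rb (some q') = goA cs (i+1) sq lp rp lb rb none := by
              conv_lhs => rw [goA]
              simp [h, h1, h2, h3]
            have hB : goB (cs[i] :: cs.drop (i+1)) (some q') [] 0 = goB (cs.drop (i+1)) none [] 0 := by
              conv_lhs => rw [hdrop2]; rw [goB]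
              simp [h1, h3]
            rw [hA, hB, ih cs (i+1) hn1]
        · have hdrop2 : cs.drop (i+1) = [] := List.drop_eq_nil_of_le (by omega)
          have hA : goA cs i sq lp rp lb rb (some q') = goA cs (i+1) sq lp rp lb rb none := by
            conv_lhs => rw [goA]
            simp [h, h1, h2]
          have hB : goB (cs[i] :: cs.drop (i+1)) (some q') [] 0 = (0, []) := by
            rw [hdrop2]; conv_lhs => rw [goB]
            simp [h1]
          rw [hA, hB, ih cs (i+1) hn1, hdrop2]
          simp [goB]
      · have hA : goA cs i sq lp rp lb rb (some q') = goA cs (i+1) sq lp rp lb rb (some q') := by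
          conv_lhs => rw [goA]
          simp [h, h1]
        have hB : goB (cs[i] :: cs.drop (i+1)) (some q') [] 0 = goB (cs.drop (i+1)) (some q') [] 0 := by
          conv_lhs => rw [goB.eq_def]
          simp [h1]
        rw [hA, hB, ih cs (i+1) hn1]

-- ===== VERDICT (by name: the statement is the Claim_ definition above) =====
theorem code_structure_signature_py_spec : Claim_equal_code_structure_signature_py := by
  intro text _
  unfold Spec_code_structure_signature_py code_structure_signature_py code_structure_signature_py_alt
  rw [key_aux text.toList.length text.toList 0 (by omega)]
  simp
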